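-- pv_equiv track=rewrite | github.com/n-levy/airqualityforecast | stage_5/scripts/comprehensive_tables_generator.py | _get_primary_data_source
-- ===== SOURCE A (Python) =====
-- from typing import Any, Dict, List, Optional
--
-- def _get_primary_data_source(data_sources: Dict) -> str:
--     """Determine the primary data source for a city."""
--     successful_sources = [
--         name
--         for name, source in data_sources.items()
--         if source.get("status") in ["success", "partial_success"]
--     ]
--
--     if not successful_sources:
--         return "None"
--
--     # Priority order
--     priority_order = [
--         "waqi",
--         "openweathermap",
--         "realistic_high_pollution",
--         "enhanced_pollution_scenarios",
--     ]
--
--     for source_name in priority_order: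
--         if source_name in successful_sources:
--             return source_name.upper()
--
--     return successful_sources[0].upper()
-- ===== SOURCE B (Python) =====
-- def _get_primary_data_source(data_sources: dict) -> str:
--     """Determine the primary data source for a city (single pass, rank map)."""
--     priority_order = [
--         "waqi",
--         "openweathermap",
--         "realistic_high_pollution",
--         "enhanced_pollution_scenarios",
--     ]
--     rank_map = {name: i for i, name in enumerate(priority_order)}
--     best_rank = len(priority_order) + 1
--     best_name = None
--     for name, source in data_sources.items():
--         if source.get("status") in ("success", "partial_success"):
--             rank = rank_map.get(name, len(priority_order))
--             if rank < best_rank: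
--                 best_rank, best_name = rank, name
--     return "None" if best_name is None else best_name.upper()
-- ===== Notes on version B (the rewrite author's own statement) =====
-- stated objective: alternative
-- what changed: Replaced the build-a-successful-list-then-scan-the-priority-list decomposition with a single pass over the items that keeps the best (lowest-rank) successful source via a precomputed rank map.
import Mathlib
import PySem

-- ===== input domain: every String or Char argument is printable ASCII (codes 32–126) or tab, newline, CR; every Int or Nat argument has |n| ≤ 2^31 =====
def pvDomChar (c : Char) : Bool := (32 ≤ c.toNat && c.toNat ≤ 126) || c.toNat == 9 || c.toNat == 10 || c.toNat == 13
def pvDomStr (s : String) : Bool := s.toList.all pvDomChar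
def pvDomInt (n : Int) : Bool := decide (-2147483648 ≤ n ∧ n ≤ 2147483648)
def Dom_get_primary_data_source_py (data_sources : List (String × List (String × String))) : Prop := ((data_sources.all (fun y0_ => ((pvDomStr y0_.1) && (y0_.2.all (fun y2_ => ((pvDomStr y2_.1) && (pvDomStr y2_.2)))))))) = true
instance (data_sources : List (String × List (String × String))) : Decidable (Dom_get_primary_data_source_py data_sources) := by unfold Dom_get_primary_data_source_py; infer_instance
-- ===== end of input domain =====

-- B changes the decomposition: one pass with a rank map instead of building the
-- successful-sources list and then scanning the priority list (objective: alternative).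

-- ===== PORT A =====
-- source.get("status") in ["success", "partial_success"]
def pvStatusOkA (source : List (String × String)) : Bool :=
  (PySem.Dict.get? (PySem.Dict.ofList source) "status") == some "success" ||
  (PySem.Dict.get? (PySem.Dict.ofList source) "status") == some "partial_success"

-- the 'for source_name in priority_order' loop (early return on membership)
def pvScanA (priority successful : List String) : String :=
  match priority with
  | [] => PySem.Str.upper (PySem.List.pyGetD successful 0 "")   -- successful_sources[0].upper()
  | p :: rest => if p ∈ successful then PySem.Str.upper p else pvScanA rest successful

def get_primary_data_source_py (data_sources : List (String × List (String × String))) : String :=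
  let successful := (data_sources.filter (fun p => pvStatusOkA p.2)).map (·.1)
  if successful = [] then "None"
  else
    pvScanA ["waqi", "openweathermap", "realistic_high_pollution",
             "enhanced_pollution_scenarios"] successful

-- ===== PORT B =====
def pvStatusOkB (source : List (String × String)) : Bool :=
  (PySem.Dict.get? (PySem.Dict.ofList source) "status") == some "success" ||
  (PySem.Dict.get? (PySem.Dict.ofList source) "status") == some "partial_success"

def pvPriorityB : List String :=
  ["waqi", "openweathermap", "realistic_high_pollution", "enhanced_pollution_scenarios"]

-- rank_map = {name: i for i, name in enumerate(priority_order)}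
def pvRankMapB : PySem.Dict String Int :=
  (PySem.List.enumerate pvPriorityB 0).foldl (fun d p => d.insert p.2 p.1) PySem.Dict.empty

def get_primary_data_source_py_alt (data_sources : List (String × List (String × String))) : String :=
  let final := data_sources.foldl
    (fun (st : Int × Option String) p =>
      if pvStatusOkB p.2 then
        let rank := PySem.Dict.getD pvRankMapB p.1 (pvPriorityB.length : Int)
        if rank < st.1 then (rank, some p.1) else st
      else st)
    ((pvPriorityB.length : Int) + 1, none)
  match final.2 with
  | none => "None"
  | some n => PySem.Str.upper n

-- ===== PRECONDITION & SPEC =====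
def Spec_get_primary_data_source_py (data_sources : List (String × List (String × String))) (out : String) : Prop := out = get_primary_data_source_py_alt data_sources
instance (data_sources : List (String × List (String × String))) (out : String) : Decidable (Spec_get_primary_data_source_py data_sources out) := by unfold Spec_get_primary_data_source_py; infer_instance

-- ===== CLAIM (what is proved, stated in full; the proofs are below) =====
def Claim_equal_get_primary_data_source_py : Prop := ∀ (data_sources : List (String × List (String × String))), Dom_get_primary_data_source_py data_sources → Spec_get_primary_data_source_py data_sources (get_primary_data_source_py data_sources)

-- ===== LEMMAS AND PROOFS =====

-- rank of a name (the value pvRankMapB.getD gives)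
def pvRank (n : String) : Int :=
  if n = "waqi" then 0
  else if n = "openweathermap" then 1
  else if n = "realistic_high_pollution" then 2
  else if n = "enhanced_pollution_scenarios" then 3
  else 4

def pvRankO : Option String → Int
  | none => 5
  | some n => pvRank n

theorem pvRankMap_getD (n : String) :
    PySem.Dict.getD pvRankMapB n (pvPriorityB.length : Int) = pvRank n := by
  simp [pvRankMapB, pvPriorityB, PySem.List.enumerate, PySem.Dict.getD_insert, pvRank]
  split_ifs <;> simp_all

-- B's fold with the Option-only state
def pvG (b : Option String) : List String → Option String
  | [] => b
  | x :: S => pvG (if pvRank x < pvRankO b then some x else b) S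

theorem pvStepEq :
    (fun (st : Int × Option String) (p : String × List (String × String)) =>
      if pvStatusOkB p.2 then
        if PySem.Dict.getD pvRankMapB p.1 (pvPriorityB.length : Int) < st.1 then
          (PySem.Dict.getD pvRankMapB p.1 (pvPriorityB.length : Int), some p.1)
        else st
      else st)
    = (fun (st : Int × Option String) p =>
        if pvStatusOkB p.2 then
          if pvRank p.1 < st.1 then (pvRank p.1, some p.1) else st
        else st) := by
  funext st p
  simp [pvRankMap_getD]

theorem pvFoldB (ds : List (String × List (String × String))) (b : Option String) :
    (ds.foldl
      (fun (st : Int × Option String) p =>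
        if pvStatusOkB p.2 then
          if pvRank p.1 < st.1 then (pvRank p.1, some p.1) else st
        else st)
      (pvRankO b, b)).2
    = pvG b ((ds.filter (fun p => pvStatusOkB p.2)).map (·.1)) := by
  induction ds generalizing b with
  | nil => simp [pvG]
  | cons hd tl ih =>
    by_cases hok : pvStatusOkB hd.2
    · simp only [List.foldl_cons, List.filter_cons, hok, if_pos, List.map_cons, pvG]
      by_cases hlt : pvRank hd.1 < pvRankO b
      · simpa [hlt] using ih (some hd.1)
      · simpa [hlt] using ih b
    · simp only [List.foldl_cons, List.filter_cons, hok, if_neg, Bool.false_eq_true,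
        not_false_eq_true]
      exact ih b

theorem pvRank_nonneg (n : String) : 0 ≤ pvRank n := by
  simp only [pvRank]; split_ifs <;> omega

theorem pvRank_le_four (n : String) : pvRank n ≤ 4 := by
  simp only [pvRank]; split_ifs <;> omega

theorem pvRank_lt0 (n : String) : (0 : Int) < pvRank n ↔ n ≠ "waqi" := by
  simp only [pvRank]; split_ifs <;> simp_all

theorem pvRank_lt1 (n : String) :
    (1 : Int) < pvRank n ↔ n ≠ "waqi" ∧ n ≠ "openweathermap" := by
  simp only [pvRank]; split_ifs <;> simp_all

theorem pvRank_lt2 (n : String) :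
    (2 : Int) < pvRank n ↔ n ≠ "waqi" ∧ n ≠ "openweathermap" ∧
      n ≠ "realistic_high_pollution" := by
  simp only [pvRank]; split_ifs <;> simp_all

theorem pvRank_lt3 (n : String) :
    (3 : Int) < pvRank n ↔ n ≠ "waqi" ∧ n ≠ "openweathermap" ∧
      n ≠ "realistic_high_pollution" ∧ n ≠ "enhanced_pollution_scenarios" := by
  simp only [pvRank]; split_ifs <;> simp_all

theorem pvG_char (S : List String) (b : Option String) :
    pvG b S =
      if "waqi" ∈ S ∨ b = some "waqi" then some "waqi"
      else if "openweathermap" ∈ S ∨ b = some "openweathermap" then some "openweathermap"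
      else if "realistic_high_pollution" ∈ S ∨ b = some "realistic_high_pollution" then
        some "realistic_high_pollution"
      else if "enhanced_pollution_scenarios" ∈ S ∨ b = some "enhanced_pollution_scenarios" then
        some "enhanced_pollution_scenarios"
      else if b = none then S.head? else b := by
  induction S generalizing b with
  | nil =>
    rcases b with _ | n
    · simp [pvG]
    · simp only [pvG, List.not_mem_nil, false_or, Option.some.injEq, List.head?_nil]
      split_ifs <;> simp_all
  | cons x S ih =>
    rw [pvG, ih]
    by_cases h1 : x = "waqi"
    · subst h1
      have hx : pvRank "waqi" = 0 := by simp [pvRank]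
      rcases b with _ | n
      · simp [pvRankO, hx]
      · by_cases hb : n = "waqi"
        · subst hb; simp [pvRankO, hx]
        · have h0 : (0 : Int) < pvRank n := (pvRank_lt0 n).2 hb
          simp [pvRankO, hx, h0, hb]
    · by_cases h2 : x = "openweathermap"
      · subst h2
        have hx : pvRank "openweathermap" = 1 := by simp [pvRank]
        rcases b with _ | n
        · simp [pvRankO, hx]
        · by_cases hw : n = "waqi"
          · subst hw; simp [pvRankO, pvRank]
          · by_cases hb : n = "openweathermap"
            · subst hb; simp [pvRankO, hx]
            · have h0 : (1 : Int) < pvRank n := (pvRank_lt1 n).2 ⟨hw, hb⟩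
              simp [pvRankO, hx, h0, hw, hb]
      · by_cases h3 : x = "realistic_high_pollution"
        · subst h3
          have hx : pvRank "realistic_high_pollution" = 2 := by simp [pvRank]
          rcases b with _ | n
          · simp [pvRankO, hx]
          · by_cases hw : n = "waqi"
            · subst hw; simp [pvRankO, pvRank]
            · by_cases ho : n = "openweathermap"
              · subst ho; simp [pvRankO, pvRank]
              · by_cases hb : n = "realistic_high_pollution"
                · subst hb; simp [pvRankO, hx]
                · have h0 : (2 : Int) < pvRank n := (pvRank_lt2 n).2 ⟨hw, ho, hb⟩
                  simp [pvRankO, hx, h0, hw, ho, hb]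
        · by_cases h4 : x = "enhanced_pollution_scenarios"
          · subst h4
            have hx : pvRank "enhanced_pollution_scenarios" = 3 := by simp [pvRank]
            rcases b with _ | n
            · simp [pvRankO, hx]
            · by_cases hw : n = "waqi"
              · subst hw; simp [pvRankO, pvRank]
              · by_cases ho : n = "openweathermap"
                · subst ho; simp [pvRankO, pvRank]
                · by_cases hr : n = "realistic_high_pollution"
                  · subst hr; simp [pvRankO, pvRank]
                  · by_cases hb : n = "enhanced_pollution_scenarios"
                    · subst hb; simp [pvRankO, hx]
                    · have h0 : (3 : Int) < pvRank n := (pvRank_lt3 n).2 ⟨hw, ho, hr, hb⟩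
                      simp [pvRankO, hx, h0, hw, ho, hr, hb]
          · have hx : pvRank x = 4 := by simp [pvRank, h1, h2, h3, h4]
            rcases b with _ | n
            · simp [pvRankO, hx, h1, h2, h3, h4, Ne.symm h1, Ne.symm h2, Ne.symm h3,
                Ne.symm h4]
            · have h5 : ¬ pvRank x < pvRankO (some n) := by
                have := pvRank_nonneg n; have := pvRank_le_four n
                simp only [pvRankO]; omega
              rw [if_neg h5]
              simp [Ne.symm h1, Ne.symm h2, Ne.symm h3, Ne.symm h4]

-- ===== VERDICT (by name: the statement is the Claim_ definition above) =====
theorem pvStatusOk_eq : pvStatusOkA = pvStatusOkB := rfl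

theorem get_primary_data_source_py_spec : Claim_equal_get_primary_data_source_py := by
  intro ds _
  unfold Spec_get_primary_data_source_py get_primary_data_source_py get_primary_data_source_py_alt
  rw [pvStatusOk_eq]
  have h1 : ((pvPriorityB.length : Int) + 1) = pvRankO none := by simp [pvPriorityB, pvRankO]
  rw [h1]
  simp only [pvStepEq]
  rw [pvFoldB ds none, pvG_char]
  rcases hS : (ds.filter (fun p => pvStatusOkB p.2)).map (·.1) with _ | ⟨hd, tl⟩ <;>
    simp only [hS]
  · simp
  · simp [pvScanA, PySem.List.pyGetD_zero_cons]
    split_ifs <;> simp
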